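-- pv_equiv track=rewrite | github.com/lutzhamel/plipy-code | chap02/lookahead/lookahead.py | lookahead_set
-- ===== SOURCE A (Python) =====
-- def first_symbol(rule_body):
--     return rule_body[0]
--
-- def nonterminal_set(G):
--     nt = set()
--     for r in G:
--         if len(r) == 2:
--             (A, B) = r
--         else:
--             (A, L, B) = r
--         nt.add(A)
--     return nt
--
-- def terminal_set(G):
--     nt = nonterminal_set(G)
--     symbols = []
--     for r in G:
--         if len(r) == 2:
--             (A, B) = r
--         else:
--             (A, L, B) = r
--         symbols.extend(B)
--     t = set(symbols) - nt
--     return t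
--
-- def lookahead_set(N, G):
--     '''
--     Accepts: N is a nonterminal in G
--     Accepts: G is a context-free grammar
--     Returns: L is a lookahead set
--     '''
--     L = set()
--     for R in G:
--         (A, rule_body) = R
--         if A == N:
--             Q = first_symbol(rule_body)
--             if Q == "":
--                 raise ValueError("nonterminal {} is a nullable prefix"
--                                  .format(A))
--             elif Q in terminal_set(G):
--                 L = L | set([Q])
--             elif Q in nonterminal_set(G):
--                 L = L | lookahead_set(Q, G)
--     return L
-- ===== SOURCE B (Python) =====
-- def lookahead_set(N, G):
--     '''
--     Accepts: N is a nonterminal in G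
--     Accepts: G is a context-free grammar
--     Returns: L is a lookahead set
--     Bottom-up dynamic program over all nonterminals: len(G)+1
--     rounds cover every acyclic first-symbol chain, instead of naive recursion.
--     '''
--     nt = set()
--     for (A, body) in G:
--         nt.add(A)
--     firsts = {}
--     for (A, body) in G:
--         if body and body[0] != "":
--             firsts.setdefault(A, []).append(body[0])
--     table = {A: set() for A in firsts}
--     for _ in range(len(G) + 1):
--         new = {}
--         for A in firsts:
--             s = set()
--             for Q in firsts[A]:
--                 if Q in nt:
--                     s = s | table.get(Q, set())
--                 else:
--                     s = s | {Q}
--             new[A] = s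
--         table = new
--     return table.get(N, set())
-- ===== Notes on version B (the rewrite author's own statement) =====
-- stated objective: alternative
-- what changed: Replaces A's top-down unmemoized recursion (which recomputes terminal_set/nonterminal_set for every matching rule and re-expands shared nonterminals) by a bottom-up dynamic program: first symbols are indexed once per nonterminal and a table of lookahead sets for all nonterminals is iterated len(G)+1 rounds (enough to cover every acyclic first-symbol chain), the answer being the table entry for N.
import Mathlib
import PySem

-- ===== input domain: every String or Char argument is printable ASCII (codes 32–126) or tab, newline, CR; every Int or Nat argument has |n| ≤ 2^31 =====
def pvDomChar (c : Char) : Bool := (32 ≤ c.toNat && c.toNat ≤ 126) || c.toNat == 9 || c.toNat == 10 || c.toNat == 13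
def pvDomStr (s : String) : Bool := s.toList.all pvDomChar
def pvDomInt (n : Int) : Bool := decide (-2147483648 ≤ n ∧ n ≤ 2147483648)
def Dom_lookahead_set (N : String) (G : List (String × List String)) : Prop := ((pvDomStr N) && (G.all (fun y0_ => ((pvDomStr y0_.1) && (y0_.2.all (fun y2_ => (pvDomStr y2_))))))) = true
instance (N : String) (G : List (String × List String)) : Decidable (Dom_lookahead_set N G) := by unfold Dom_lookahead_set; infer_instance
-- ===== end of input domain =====

-- B replaces A's unmemoized top-down recursion by a bottom-up dynamic program: a table of
-- lookahead sets for all nonterminals, iterated len(G)+1 rounds over first symbols indexed once.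

-- ===== PORT A =====
-- nonterminal_set(G)  (rules are pairs under the stated type, so only the len(r)==2 branch fires)
def pvNonterminalSet (G : List (String × List String)) : List String :=
  G.foldl (fun nt r => PySem.Set.add nt r.1) []

-- terminal_set(G)
def pvTerminalSet (G : List (String × List String)) : List String :=
  PySem.Set.diff
    (PySem.Set.ofList (G.foldl (fun symbols r => symbols ++ r.2) []))
    (pvNonterminalSet G)

-- lookahead_set with fuel making the (possibly non-terminating) Python recursion total;
-- fuel G.length+1 bounds the recursion depth on every input the Python returns on
-- (acyclic first-chains visit distinct left-hand sides). first_symbol = rule_body[0]: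
-- pyGet? = none is Python's IndexError, Q = "" Python's ValueError — both outside Pre_.
def lookaheadA (fuel : Nat) (N : String) (G : List (String × List String)) : List String :=
  match fuel with
  | 0 => []
  | f + 1 =>
    G.foldl (fun L R =>
      if R.1 == N then
        match PySem.List.pyGet? R.2 0 with
        | none => L                           -- IndexError (excluded by Pre_)
        | some Q =>
          if Q == "" then L                   -- raise ValueError (excluded by Pre_)
          else if PySem.Set.contains (pvTerminalSet G) Q then
            PySem.Set.union L (PySem.Set.ofList [Q])
          else if PySem.Set.contains (pvNonterminalSet G) Q then
            PySem.Set.union L (lookaheadA f Q G)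
          else L
      else L) []

def lookahead_set (N : String) (G : List (String × List String)) : List String :=
  lookaheadA (G.length + 1) N G

-- ===== PORT B =====
-- firsts: per nonterminal the first symbols of its rules, grammar order
-- ('if body and body[0] != "": firsts.setdefault(A, []).append(body[0])')
def pvFirsts (G : List (String × List String)) : PySem.Dict String (List String) :=
  G.foldl (fun d r =>
    match r.2 with
    | [] => d
    | Q :: _ => if Q == "" then d else d.modify r.1 [] (· ++ [Q])) PySem.Dict.empty

-- one round: new[A] = union over Q in firsts[A] of (table.get(Q, set()) if Q in nt else {Q})
def pvRound (nt : List String) (firsts : PySem.Dict String (List String))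
    (table : PySem.Dict String (List String)) : PySem.Dict String (List String) :=
  firsts.items.foldl (fun new p =>
    new.insert p.1
      (p.2.foldl (fun s Q =>
        if PySem.Set.contains nt Q then PySem.Set.union s (table.getD Q [])
        else PySem.Set.union s (PySem.Set.ofList [Q])) [])) PySem.Dict.empty

def lookahead_set_alt (N : String) (G : List (String × List String)) : List String :=
  let nt := G.foldl (fun s r => PySem.Set.add s r.1) []
  let firsts := pvFirsts G
  let init : PySem.Dict String (List String) :=
    firsts.keys.foldl (fun d A => d.insert A []) PySem.Dict.empty
  let table := (List.range (G.length + 1)).foldl (fun tbl _ => pvRound nt firsts tbl) init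
  table.getD N []

-- ===== PRECONDITION & SPEC =====
-- helpers for Pre_: the first-symbol graph on nonterminals, restricted to what A explores
def pvSuccs (G : List (String × List String)) (M : String) : List String :=
  G.filterMap (fun r =>
    match r.2 with
    | [] => none
    | Q :: _ =>
      if r.1 = M ∧ Q ≠ "" ∧ Q ∈ pvNonterminalSet G then some Q else none)

def pvReachStep (G : List (String × List String)) (V : List String) : List String :=
  V.foldl (fun W M => PySem.Set.update W (pvSuccs G M)) V

def pvReach (G : List (String × List String)) (start : List String) : List String :=
  (List.range (G.length + 1)).foldl (fun V _ => pvReachStep G V) (PySem.Set.ofList start)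

-- Pre_: exactly the inputs on which the Python A returns normally: every rule whose
-- left-hand side is first-reachable from N has a nonempty body whose first symbol is
-- not "" (else IndexError / ValueError), and no reachable nonterminal lies on a
-- first-symbol cycle (else the recursion never terminates: RecursionError).
def Pre_lookahead_set (N : String) (G : List (String × List String)) : Prop :=
  (∀ r ∈ G, r.1 ∈ pvReach G [N] → r.2 ≠ [] ∧ r.2.head? ≠ some "") ∧
  (∀ M ∈ pvReach G [N], M ∉ pvReach G (pvSuccs G M))

instance (N : String) (G : List (String × List String)) : Decidable (Pre_lookahead_set N G) := by
  unfold Pre_lookahead_set; infer_instance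

def pvWitness_lookahead_set : String × (List (String × List String)) :=
  ("S", [("S", ["A", "x"]), ("S", ["s"]), ("A", ["a", "A"])])

def Spec_lookahead_set (N : String) (G : List (String × List String)) (out : List String) : Prop := out = lookahead_set_alt N G
instance (N : String) (G : List (String × List String)) (out : List String) : Decidable (Spec_lookahead_set N G out) := by unfold Spec_lookahead_set; infer_instance

-- ===== CLAIM (what is proved, stated in full; the proofs are below) =====
def Claim_equal_lookahead_set : Prop := ∀ (N : String) (G : List (String × List String)), Dom_lookahead_set N G → Pre_lookahead_set N G → Spec_lookahead_set N G (lookahead_set N G)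

-- ===== LEMMAS AND PROOFS =====

-- lhs/first-symbol pairs of the rules A and B actually use (nonempty body, first symbol not "")
def pvPairs (G : List (String × List String)) : List (String × String) :=
  G.filterMap (fun r =>
    match r.2 with
    | [] => none
    | Q :: _ => if Q == "" then none else some (r.1, Q))

def pvFirstsList (G : List (String × List String)) (M : String) : List String :=
  ((pvPairs G).filter (fun p => p.1 == M)).map (·.2)

def pvGStep (G : List (String × List String)) (f : Nat) (L : List String) (Q : String) : List String :=
  if PySem.Set.contains (pvTerminalSet G) Q then PySem.Set.union L (PySem.Set.ofList [Q])
  else if PySem.Set.contains (pvNonterminalSet G) Q then PySem.Set.union L (lookaheadA f Q G)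
  else L

def pvBStep (nt : List String) (tbl : PySem.Dict String (List String))
    (s : List String) (Q : String) : List String :=
  if PySem.Set.contains nt Q then PySem.Set.union s (tbl.getD Q [])
  else PySem.Set.union s (PySem.Set.ofList [Q])

def pvInit (G : List (String × List String)) : PySem.Dict String (List String) :=
  (pvFirsts G).keys.foldl (fun d A => d.insert A []) PySem.Dict.empty

lemma pvFirsts_eq_pairs_foldl :
    ∀ (Gl : List (String × List String)) (d : PySem.Dict String (List String)),
      Gl.foldl (fun d r =>
        match r.2 with
        | [] => d
        | Q :: _ => if Q == "" then d else d.modify r.1 [] (· ++ [Q])) d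
      = (pvPairs Gl).foldl (fun d p => d.modify p.1 [] (· ++ [p.2])) d := by
  intro Gl
  induction Gl with
  | nil => intro d; rfl
  | cons r Gl ih =>
    intro d
    obtain ⟨A, body⟩ := r
    cases body with
    | nil => simpa [pvPairs] using ih d
    | cons Q t =>
      by_cases hQ : Q = ""
      · simpa [pvPairs, List.filterMap_cons, hQ] using ih d
      · simpa [pvPairs, List.filterMap_cons, hQ] using ih (d.modify A [] (· ++ [Q]))

lemma pvFirsts_getD (G : List (String × List String)) (M : String) :
    (pvFirsts G).getD M [] = pvFirstsList G M := by
  show (G.foldl (fun d r =>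
        match r.2 with
        | [] => d
        | Q :: _ => if Q == "" then d else d.modify r.1 [] (· ++ [Q])) PySem.Dict.empty).getD M []
      = pvFirstsList G M
  rw [pvFirsts_eq_pairs_foldl]
  simp [PySem.Dict.getD_foldl_modify_append, pvFirstsList]

lemma pvFirsts_keys_nodup (G : List (String × List String)) : (pvFirsts G).keys.Nodup := by
  show (G.foldl (fun d r =>
        match r.2 with
        | [] => d
        | Q :: _ => if Q == "" then d else d.modify r.1 [] (· ++ [Q])) PySem.Dict.empty).keys.Nodup
  rw [pvFirsts_eq_pairs_foldl]
  exact PySem.Dict.nodup_keys_foldl_modify_key (pvPairs G) (fun p => p.1) []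
    (fun _ p => fun x => x ++ [p.2]) PySem.Dict.empty PySem.Dict.nodup_keys_empty

lemma pvFirstsList_eq_nil_of_not_mem_keys (G : List (String × List String)) (M : String)
    (h : M ∉ (pvFirsts G).keys) : pvFirstsList G M = [] := by
  rw [← pvFirsts_getD]
  refine PySem.Dict.getD_of_not_contains _ _ ?_
  cases hc : (pvFirsts G).contains M with
  | false => rfl
  | true => exact absurd ((PySem.Dict.contains_iff_mem_keys _ _).1 hc) h

lemma pvInit_getD (G : List (String × List String)) (M : String) :
    (pvInit G).getD M [] = [] := by
  show ((pvFirsts G).keys.foldl (fun d A => d.insert A []) PySem.Dict.empty).getD M [] = []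
  have step : ∀ (l : List String) (d : PySem.Dict String (List String)),
      (∀ K, d.getD K [] = []) → ∀ M, (l.foldl (fun d A => d.insert A []) d).getD M [] = [] := by
    intro l
    induction l with
    | nil => intro d h M; exact h M
    | cons A l ih =>
      intro d h M
      refine ih (d.insert A []) ?_ M
      intro K
      rw [PySem.Dict.getD_insert]
      split
      · rfl
      · exact h K
  exact step _ _ (fun K => PySem.Dict.getD_empty K []) M

lemma pvRound_items (nt : List String) (firsts tbl : PySem.Dict String (List String))
    (hnd : firsts.keys.Nodup) :
    (pvRound nt firsts tbl).items
      = firsts.items.map (fun p => (p.1, p.2.foldl (pvBStep nt tbl) [])) := by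
  have h := PySem.Dict.items_foldl_insert_fresh (l := firsts.items) (k := fun p => p.1)
    (v := fun p => p.2.foldl (pvBStep nt tbl) []) (d := PySem.Dict.empty)
    (fun a _ => PySem.Dict.contains_empty a.1) (by simpa [PySem.Dict.keys] using hnd)
  simpa [PySem.Dict.empty] using h

lemma pvRound_getD_mem (nt : List String) (firsts tbl : PySem.Dict String (List String))
    (hnd : firsts.keys.Nodup) (M : String) (qs : List String)
    (h : firsts.get? M = some qs) :
    (pvRound nt firsts tbl).getD M [] = qs.foldl (pvBStep nt tbl) [] := by
  have hmem : (M, qs) ∈ firsts.items := PySem.Dict.mem_items_of_get?_eq_some _ h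
  have hmem' : (M, qs.foldl (pvBStep nt tbl) []) ∈ (pvRound nt firsts tbl).items := by
    rw [pvRound_items nt firsts tbl hnd]
    exact List.mem_map.2 ⟨(M, qs), hmem, rfl⟩
  have hnd' : (pvRound nt firsts tbl).keys.Nodup := by
    simp only [PySem.Dict.keys, pvRound_items nt firsts tbl hnd, List.map_map]
    simpa [PySem.Dict.keys, Function.comp] using hnd
  exact PySem.Dict.getD_of_mem_items _ hmem' hnd' []

lemma pvRound_getD_not_mem (nt : List String) (firsts tbl : PySem.Dict String (List String))
    (hnd : firsts.keys.Nodup) (M : String) (h : M ∉ firsts.keys) :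
    (pvRound nt firsts tbl).getD M [] = [] := by
  refine PySem.Dict.getD_of_not_contains _ _ ?_
  cases hc : (pvRound nt firsts tbl).contains M with
  | false => rfl
  | true =>
    have hk := (PySem.Dict.contains_iff_mem_keys _ _).1 hc
    simp only [PySem.Dict.keys, pvRound_items nt firsts tbl hnd, List.map_map] at hk
    exact absurd (by simpa [PySem.Dict.keys, Function.comp] using hk) h

lemma pvMem_symbols (G : List (String × List String)) (M Q : String)
    (h : Q ∈ pvFirstsList G M) : Q ∈ G.foldl (fun symbols r => symbols ++ r.2) [] := by
  rw [PySem.List.foldl_append_eq_flatMap]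
  simp only [List.nil_append, List.mem_flatMap]
  simp only [pvFirstsList, List.mem_map, List.mem_filter] at h
  obtain ⟨p, ⟨hp, _⟩, hpq⟩ := h
  simp only [pvPairs, List.mem_filterMap] at hp
  obtain ⟨r, hr, hmatch⟩ := hp
  cases hb : r.2 with
  | nil => rw [hb] at hmatch; exact absurd hmatch (by simp)
  | cons Q' t =>
    rw [hb] at hmatch
    by_cases hQ' : Q' = ""
    · simp [hQ'] at hmatch
    · simp [hQ'] at hmatch
      have hQQ : Q' = Q := by rw [← hpq, ← hmatch]
      exact ⟨r, hr, by rw [hb, hQQ]; exact List.mem_cons_self⟩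

lemma pvStep_agree (G : List (String × List String)) (f : Nat)
    (tbl : PySem.Dict String (List String)) (M : String)
    (ih : ∀ K, tbl.getD K [] = lookaheadA f K G) :
    ∀ Q ∈ pvFirstsList G M, ∀ s,
      pvBStep (pvNonterminalSet G) tbl s Q = pvGStep G f s Q := by
  intro Q hQ s
  by_cases hnt : Q ∈ pvNonterminalSet G
  · have ht : Q ∉ pvTerminalSet G := by
      rw [pvTerminalSet]
      intro hmem
      exact ((PySem.Set.mem_diff _ _ _).1 hmem).2 hnt
    simp [pvBStep, pvGStep, ht, hnt, ih Q]
  · have ht : Q ∈ pvTerminalSet G := by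
      rw [pvTerminalSet]
      exact (PySem.Set.mem_diff _ _ _).2
        ⟨(PySem.Set.mem_ofList _ _).2 (pvMem_symbols G M Q hQ), hnt⟩
    simp [pvBStep, pvGStep, ht, hnt]

lemma pvLookaheadA_fold (G0 : List (String × List String)) (f : Nat) (M : String) :
    ∀ (Gl : List (String × List String)) (L0 : List String),
      Gl.foldl (fun L R =>
        if R.1 == M then
          match PySem.List.pyGet? R.2 0 with
          | none => L
          | some Q => if Q == "" then L else pvGStep G0 f L Q
        else L) L0
      = (pvFirstsList Gl M).foldl (pvGStep G0 f) L0 := by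
  intro Gl
  induction Gl with
  | nil => intro L0; rfl
  | cons r Gl ih =>
    intro L0
    obtain ⟨A, body⟩ := r
    cases body with
    | nil =>
      have hnone : PySem.List.pyGet? ([] : List String) 0 = none := by
        simp [PySem.List.pyGet?, PySem.List.pyIdx?]
      simpa [pvFirstsList, pvPairs, hnone] using ih L0
    | cons Q t =>
      have hsome : PySem.List.pyGet? (Q :: t) 0 = some Q := by
        simp [PySem.List.pyGet?, PySem.List.pyIdx?]
      by_cases hA : A = M
      · by_cases hQ : Q = ""
        · simpa [pvFirstsList, pvPairs, List.filterMap_cons, hsome, hA, hQ] using ih L0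
        · simpa [pvFirstsList, pvPairs, List.filterMap_cons, hsome, hA, hQ]
            using ih (pvGStep G0 f L0 Q)
      · by_cases hQ : Q = ""
        · simpa [pvFirstsList, pvPairs, List.filterMap_cons, hsome, hA, hQ] using ih L0
        · simpa [pvFirstsList, pvPairs, List.filterMap_cons, hsome, hA, hQ] using ih L0

lemma pvLookaheadA_succ (f : Nat) (M : String) (G : List (String × List String)) :
    lookaheadA (f + 1) M G = (pvFirstsList G M).foldl (pvGStep G f) [] := by
  exact pvLookaheadA_fold G f M G []

lemma pvInv (G : List (String × List String)) :
    ∀ (k : Nat) (M : String),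
      ((List.range k).foldl (fun tbl _ => pvRound (pvNonterminalSet G) (pvFirsts G) tbl)
        (pvInit G)).getD M []
      = lookaheadA k M G := by
  intro k
  induction k with
  | zero =>
    intro M
    simpa [lookaheadA] using pvInit_getD G M
  | succ k ih =>
    intro M
    rw [List.range_succ, List.foldl_append]
    simp only [List.foldl_cons, List.foldl_nil]
    rw [pvLookaheadA_succ]
    cases hm : (pvFirsts G).get? M with
    | none =>
      have hk : M ∉ (pvFirsts G).keys := (PySem.Dict.get?_eq_none_iff_not_mem_keys _ _).1 hm
      rw [pvRound_getD_not_mem _ _ _ (pvFirsts_keys_nodup G) M hk,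
        pvFirstsList_eq_nil_of_not_mem_keys G M hk]
      rfl
    | some qs =>
      rw [pvRound_getD_mem _ _ _ (pvFirsts_keys_nodup G) M qs hm]
      have hqs : qs = pvFirstsList G M := by
        rw [← pvFirsts_getD]
        exact (PySem.Dict.getD_of_get?_eq_some _ [] hm).symm
      rw [hqs]
      exact PySem.List.foldl_congr_mem' _ _ _ _ (pvStep_agree G k _ M ih)

-- ===== VERDICT (by name: the statement is the Claim_ definition above) =====
theorem lookahead_set_spec : Claim_equal_lookahead_set := by
  intro N G _ _
  show lookaheadA (G.length + 1) N G
    = ((List.range (G.length + 1)).foldl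
        (fun tbl _ => pvRound (pvNonterminalSet G) (pvFirsts G) tbl) (pvInit G)).getD N []
  exact (pvInv G (G.length + 1) N).symm
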